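-- pv_equiv track=rewrite | github.com/DarianHole/measeq-genomic-summary | scripts/multi_seq_compare.py | find_N
-- ===== SOURCE A (Python) =====
-- def find_N(sequence: str, start=True) -> int:
--     '''
--     PURPOSE:
--         Find the position of N's on either the 5' and 3' end of the sequence
--             based on if start is set to true or not
--     INPUTS:
--         sequence: String of the lowercase genomic nucleotide sequence
--         start: Boolean switch to determine if were counting 5' or 3' N's
--
--     RETURNS:
--         Integer index of first non N from either the start (start = True) or end (start = False) of the sequence
--     '''
--
--     if start:
--         # Nucleotide location of first non-N is equal to number of N's (or -) at the start
--         for position, char in enumerate(sequence):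
--             if (char != 'n') and (char != '-'):
--                 return position
--     else:
--         # Iteration from the end of the sequence, position of first N is equal to the length
--         # of the sequence minus the first location that is not an N when iterating from the end
--         for position, char in enumerate(sequence[::-1]):
--             if (char != 'n') and (char != '-'):
--                 return position
-- ===== SOURCE B (Python) =====
-- def find_N(sequence: str, start=True) -> int:
--     # Strip the n/- run from the relevant end, then compute the index arithmetically.
--     stripped = sequence.lstrip('n-') if start else sequence.rstrip('n-')
--     if not stripped:
--         return None
--     return len(sequence) - len(stripped)
-- ===== Notes on version B (the rewrite author's own statement) =====
-- stated objective: simpler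
-- what changed: Replaces the explicit enumerate loop (and the reversed-string loop) with a single strip of the leading/trailing run of masked characters followed by an arithmetic length difference, with an explicit None when the strip empties the sequence.
import Mathlib
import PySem

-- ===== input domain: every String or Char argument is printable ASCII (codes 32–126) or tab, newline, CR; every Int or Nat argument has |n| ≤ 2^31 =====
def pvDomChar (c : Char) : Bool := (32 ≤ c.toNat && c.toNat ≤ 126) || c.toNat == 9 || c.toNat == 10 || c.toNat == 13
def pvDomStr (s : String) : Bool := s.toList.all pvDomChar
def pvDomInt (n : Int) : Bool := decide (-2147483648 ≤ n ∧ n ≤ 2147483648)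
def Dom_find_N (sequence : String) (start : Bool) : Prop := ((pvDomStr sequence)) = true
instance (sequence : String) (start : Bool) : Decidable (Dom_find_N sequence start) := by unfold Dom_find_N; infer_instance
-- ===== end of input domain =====

-- B replaces A's per-character enumerate loops by an lstrip/rstrip of the 'n-' run
-- plus a length subtraction (objective: simpler).

-- ===== PORT A =====
-- the 'for position, char in enumerate(...)' loop with its early return; falls off → None
def findNLoop : List (Int × Char) → Option Int
  | [] => none
  | (position, char) :: rest =>
      if char ≠ 'n' ∧ char ≠ '-' then some position else findNLoop rest

def find_N (sequence : String) (start : Bool) : Option Int :=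
  if start then
    findNLoop (PySem.List.enumerate sequence.toList 0)
  else
    -- sequence[::-1] is the reversed string (PySem.Str.slice?_none_none_neg_one)
    findNLoop (PySem.List.enumerate sequence.toList.reverse 0)

-- ===== PORT B =====
def find_N_alt (sequence : String) (start : Bool) : Option Int :=
  -- lstrip('n-') = dropWhile; rstrip('n-') = reverse ∘ dropWhile ∘ reverse (exact on all strings)
  let stripped : List Char :=
    if start then sequence.toList.dropWhile (fun c => c == 'n' || c == '-')
    else (sequence.toList.reverse.dropWhile (fun c => c == 'n' || c == '-')).reverse
  if stripped = [] then none
  else some ((sequence.toList.length : Int) - stripped.length)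

-- ===== PRECONDITION & SPEC =====
def Spec_find_N (sequence : String) (start : Bool) (out : Option Int) : Prop := out = find_N_alt sequence start
instance (sequence : String) (start : Bool) (out : Option Int) : Decidable (Spec_find_N sequence start out) := by unfold Spec_find_N; infer_instance

-- ===== CLAIM (what is proved, stated in full; the proofs are below) =====
def Claim_equal_find_N : Prop := ∀ (sequence : String) (start : Bool), Dom_find_N sequence start → Spec_find_N sequence start (find_N sequence start)

-- ===== LEMMAS AND PROOFS =====

-- A's enumerate loop returns start-offset + length of the dropped 'n-' run, or none if it drops everything
theorem findNLoop_eq_dropWhile (l : List Char) (s : Int) :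
    findNLoop (PySem.List.enumerate l s) =
      (let d := l.dropWhile (fun c => c == 'n' || c == '-')
       if d = [] then none else some (s + ((l.length : Int) - d.length))) := by
  induction l generalizing s with
  | nil => simp [PySem.List.enumerate_nil, findNLoop]
  | cons c l' ih =>
    rw [PySem.List.enumerate_cons]
    by_cases hc : c = 'n' ∨ c = '-'
    · have hp : (fun c => c == 'n' || c == '-') c = true := by
        rcases hc with h | h <;> simp [h]
      have hne : ¬ (c ≠ 'n' ∧ c ≠ '-') := by
        rcases hc with h | h <;> simp [h]
      simp only [findNLoop, if_neg hne, ih (s + 1), List.dropWhile_cons, hp]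
      by_cases hd : l'.dropWhile (fun c => c == 'n' || c == '-') = []
      · simp [hd]
      · simp only [hd, if_true, if_false, List.length_cons]
        congr 1
        push_cast
        ring
    · have hyes : (c ≠ 'n' ∧ c ≠ '-') := by rw [not_or] at hc; exact hc
      have hp : (fun c => c == 'n' || c == '-') c = false := by
        simp [hyes.1, hyes.2]
      simp only [findNLoop, if_pos hyes, List.dropWhile_cons, hp]
      simp

-- ===== VERDICT (by name: the statement is the Claim_ definition above) =====
theorem find_N_spec : Claim_equal_find_N := by
  intro sequence start _
  unfold Spec_find_N find_N find_N_alt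
  cases start with
  | true =>
    simp only [findNLoop_eq_dropWhile sequence.toList 0]
    by_cases hd : sequence.toList.dropWhile (fun c => c == 'n' || c == '-') = [] <;>
      simp [hd]
  | false =>
    simp only [Bool.false_eq_true, if_false, findNLoop_eq_dropWhile sequence.toList.reverse 0]
    by_cases hd : sequence.toList.reverse.dropWhile (fun c => c == 'n' || c == '-') = [] <;>
      simp [hd]
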